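-- pv_equiv track=rewrite | github.com/microsoft/fhir-server | .github/scripts/pr_review_agent.py | _filter_code_diff
-- ===== SOURCE A (Python) =====
-- def _filter_code_diff(diff: str) -> str:
--     """Return only src/ and test/ hunks from a unified diff, dropping docs/yml/md."""
--     CODE_PREFIXES = ("src/", "test/", "a/src/", "b/src/", "a/test/", "b/test/")
--     sections: list[str] = []
--     current: list[str] = []
--     in_code = False
--
--     for line in diff.splitlines(keepends=True):
--         if line.startswith("diff --git"):
--             if current and in_code:
--                 sections.append("".join(current))
--             current = [line]
--             in_code = any(p in line for p in CODE_PREFIXES)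
--         else:
--             current.append(line)
--
--     if current and in_code:
--         sections.append("".join(current))
--
--     return "".join(sections) if sections else diff
-- ===== SOURCE B (Python) =====
-- def _filter_code_diff(diff: str) -> str:
--     """Return only src/ and test/ hunks from a unified diff, dropping docs/yml/md."""
--     CODE_PREFIXES = ("src/", "test/", "a/src/", "b/src/", "a/test/", "b/test/")
--     lines = diff.splitlines(keepends=True)
--     n = len(lines)
--     # stage 1: group the diff into per-file sections (header + following body lines),
--     # discarding any preamble before the first header
--     sections = []
--     i = 0
--     while i < n:
--         if lines[i].startswith("diff --git"):
--             j = i + 1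
--             while j < n and not lines[j].startswith("diff --git"):
--                 j += 1
--             sections.append(lines[i:j])
--             i = j
--         else:
--             i += 1
--     # stage 2: keep only sections whose header line mentions a code path
--     kept = [sec for sec in sections if any(p in sec[0] for p in CODE_PREFIXES)]
--     return "".join("".join(sec) for sec in kept) if kept else diff
-- ===== Notes on version B (the rewrite author's own statement) =====
-- stated objective: alternative
-- what changed: B is two staged passes: first group the whole diff into a list of per-file sections (header plus body lines, preamble dropped), then a separate filtering pass keeps sections whose header mentions a code path; A instead runs one flag-driven loop that decides keep/drop while accumulating and needs an end-of-loop flush.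
import Mathlib
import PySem

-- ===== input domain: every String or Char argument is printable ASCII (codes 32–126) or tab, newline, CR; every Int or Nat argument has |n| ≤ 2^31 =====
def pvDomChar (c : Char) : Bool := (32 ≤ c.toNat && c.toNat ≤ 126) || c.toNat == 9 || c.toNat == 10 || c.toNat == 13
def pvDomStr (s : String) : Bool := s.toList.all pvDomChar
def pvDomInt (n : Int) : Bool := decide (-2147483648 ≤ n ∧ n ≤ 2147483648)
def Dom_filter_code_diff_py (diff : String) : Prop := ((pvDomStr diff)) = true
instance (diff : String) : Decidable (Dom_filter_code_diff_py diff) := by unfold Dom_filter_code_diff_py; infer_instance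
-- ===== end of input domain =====

-- B replaces A's flag-driven single loop by two staged passes: group the diff into per-file
-- sections first, then filter those sections by their header line (objective: alternative).

-- shared primitive: str.splitlines(keepends=True); exact on the Dom alphabet
-- (the only line breaks among codes 9,10,13,32–126 are '\n', '\r' and '\r\n')
def pvSplitKeep : List Char → List (List Char)
  | [] => []
  | '\r' :: '\n' :: rest => ['\r', '\n'] :: pvSplitKeep rest
  | c :: rest =>
    if c = '\n' || c = '\r' then [c] :: pvSplitKeep rest
    else
      match pvSplitKeep rest with
      | [] => [[c]]
      | line :: more => (c :: line) :: more

def pvHdr : List Char := "diff --git".toList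

def pvCodePrefixes : List (List Char) :=
  ["src/".toList, "test/".toList, "a/src/".toList, "b/src/".toList, "a/test/".toList, "b/test/".toList]

def pvIsCode (l : List Char) : Bool := pvCodePrefixes.any (fun p => PySem.Chars.isIn p l)

-- ===== PORT A =====
def pvStepA (st : List (List Char) × List (List Char) × Bool) (l : List Char) :
    List (List Char) × List (List Char) × Bool :=
  if PySem.Chars.startswith l pvHdr then
    ((if !st.2.1.isEmpty && st.2.2 then st.1 ++ [st.2.1.flatten] else st.1), [l], pvIsCode l)
  else
    (st.1, st.2.1 ++ [l], st.2.2)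

def filter_code_diff_py (diff : String) : String :=
  let st := (pvSplitKeep diff.toList).foldl pvStepA ([], [], false)
  let secs := if !st.2.1.isEmpty && st.2.2 then st.1 ++ [st.2.1.flatten] else st.1
  if !secs.isEmpty then String.ofList secs.flatten else diff

-- ===== PORT B =====
-- stage 1 of Source B: the outer while-loop over indices; the inner while that collects the
-- body of a section is the takeWhile, and the jump 'i = j' is the matching dropWhile
def pvGroup : List (List Char) → List (List (List Char))
  | [] => []
  | l :: ls =>
    if PySem.Chars.startswith l pvHdr then
      (l :: ls.takeWhile (fun x => !PySem.Chars.startswith x pvHdr)) ::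
        pvGroup (ls.dropWhile (fun x => !PySem.Chars.startswith x pvHdr))
    else pvGroup ls
termination_by ls => ls.length
decreasing_by
  · exact Nat.lt_succ_of_le (List.length_dropWhile_le ..)
  · simp

def filter_code_diff_py_alt (diff : String) : String :=
  let sections := pvGroup (pvSplitKeep diff.toList)
  let kept := sections.filter (fun sec => pvIsCode (sec.headD []))
  if !kept.isEmpty then String.ofList (kept.map List.flatten).flatten else diff

-- ===== PRECONDITION & SPEC =====
def Spec_filter_code_diff_py (diff : String) (out : String) : Prop := out = filter_code_diff_py_alt diff
instance (diff : String) (out : String) : Decidable (Spec_filter_code_diff_py diff out) := by unfold Spec_filter_code_diff_py; infer_instance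

-- ===== CLAIM (what is proved, stated in full; the proofs are below) =====
def Claim_equal_filter_code_diff_py : Prop := ∀ (diff : String), Dom_filter_code_diff_py diff → Spec_filter_code_diff_py diff (filter_code_diff_py diff)

-- ===== LEMMAS AND PROOFS =====

-- the kept sections of a list of lines (reference form both ports are reduced to)
def pvKept : List (List Char) → List (List Char)
  | [] => []
  | l :: ls =>
    if PySem.Chars.startswith l pvHdr && pvIsCode l then
      (l ++ (ls.takeWhile (fun x => !PySem.Chars.startswith x pvHdr)).flatten) :: pvKept ls
    else pvKept ls

def pvFinA (st : List (List Char) × List (List Char) × Bool) : List (List Char) :=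
  if !st.2.1.isEmpty && st.2.2 then st.1 ++ [st.2.1.flatten] else st.1

lemma pvFoldA_char (lines : List (List Char)) (secs cur : List (List Char)) (inc : Bool)
    (h : inc = true → cur ≠ []) :
    pvFinA (lines.foldl pvStepA (secs, cur, inc)) =
      secs ++
        (if inc && !cur.isEmpty then
            [(cur ++ lines.takeWhile (fun x => !PySem.Chars.startswith x pvHdr)).flatten]
          else []) ++ pvKept lines := by
  induction lines generalizing secs cur inc with
  | nil =>
    simp only [List.foldl_nil, pvFinA, pvKept, List.takeWhile_nil, List.append_nil]
    by_cases hi : inc = true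
    · have := h hi
      simp [hi, this]
    · simp at hi
      simp [hi]
  | cons l ls ih =>
    simp only [List.foldl_cons, pvStepA, pvKept, List.takeWhile]
    by_cases hh : PySem.Chars.startswith l pvHdr = true
    · rw [if_pos hh]
      rw [ih _ _ _ (by intro _; simp)]
      simp only [hh, Bool.true_and]
      by_cases hi : inc = true
      · have hc := h hi
        simp only [hi, Bool.true_and]
        by_cases hcode : pvIsCode l = true <;>
          simp [hcode, hc]
      · simp at hi
        by_cases hcode : pvIsCode l = true <;>
          simp [hi, hcode]
    · rw [if_neg hh]
      rw [ih _ _ _ (by intro hi; simp)]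
      simp only [hh, Bool.false_and]
      by_cases hi : inc = true
      · have hc := h hi
        simp [hi, hc]
      · simp at hi
        simp [hi]

-- pvKept ignores leading non-header lines
lemma pvKept_dropWhile (ls : List (List Char)) :
    pvKept (ls.dropWhile (fun x => !PySem.Chars.startswith x pvHdr)) = pvKept ls := by
  induction ls with
  | nil => rfl
  | cons l ls ih =>
    by_cases hh : PySem.Chars.startswith l pvHdr = true
    · simp [List.dropWhile, hh]
    · simp only [List.dropWhile, hh, Bool.not_false]
      simp [pvKept, hh] at ih ⊢
      simpa [hh] using ih

-- B's grouped-then-filtered sections are exactly the reference kept sections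
lemma pvGroup_filter (lines : List (List Char)) :
    ((pvGroup lines).filter (fun sec => pvIsCode (sec.headD []))).map List.flatten =
      pvKept lines := by
  induction lines using pvGroup.induct with
  | case1 => rw [pvGroup, pvKept]; rfl
  | case2 l ls hh ih =>
    rw [pvGroup, if_pos hh, List.filter_cons]
    simp only [List.headD_cons]
    by_cases hc : pvIsCode l = true
    · rw [if_pos hc, List.map_cons, ih, pvKept_dropWhile, pvKept,
        if_pos (by simp [hh, hc]), List.flatten_cons]
    · rw [if_neg hc, ih, pvKept_dropWhile, pvKept, if_neg (by simp [hc])]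
  | case3 l ls hh ih =>
    rw [pvGroup, if_neg hh, ih, pvKept]
    simp only [Bool.not_eq_true] at hh
    rw [if_neg (by simp [hh])]

lemma pvPorts_eq (diff : String) : filter_code_diff_py diff = filter_code_diff_py_alt diff := by
  have hA := pvFoldA_char (pvSplitKeep diff.toList) [] [] false (by simp)
  have hB := pvGroup_filter (pvSplitKeep diff.toList)
  simp only [Bool.false_and, Bool.false_eq_true, if_false, List.nil_append, pvFinA] at hA
  simp only [filter_code_diff_py, filter_code_diff_py_alt, hA, ← hB]
  have hlen : (((pvGroup (pvSplitKeep diff.toList)).filter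
      (fun sec => pvIsCode (sec.headD []))).map List.flatten).isEmpty =
      ((pvGroup (pvSplitKeep diff.toList)).filter (fun sec => pvIsCode (sec.headD []))).isEmpty := by
    simp
  rw [hlen]

-- ===== VERDICT (by name: the statement is the Claim_ definition above) =====
theorem filter_code_diff_py_spec : Claim_equal_filter_code_diff_py := by
  intro diff _
  unfold Spec_filter_code_diff_py
  exact pvPorts_eq diff
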